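-- pv_equiv track=rewrite | github.com/synssins/glados-docker | glados/intent/rules.py | domain_filter_for_utterance
-- ===== SOURCE A (Python) =====
-- _DEFAULT_KEYWORD_DOMAINS: dict[str, list[str]] = {
--     "light":     ["light", "switch"],
--     "lights":    ["light", "switch"],
--     "lamp":      ["light"],
--     "lamps":     ["light"],
--     "bulb":      ["light"],
--     "bulbs":     ["light"],
--     # Phase 8.3 follow-up — LED strips, zones, and segment-level
--     # entities are always lights. "Bedroom strip" / "reading nook
--     # strip" / "hallway zone" previously fell through the
--     # precheck because no noun matched.
--     "strip":     ["light"],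
--     "strips":    ["light"],
--     "zone":      ["light"],
--     "zones":     ["light"],
--     "segment":   ["light"],
--     "segments":  ["light"],
--     "node":      ["light"],
--     "nodes":     ["light"],
--     "pixel":     ["light"],
--     "pixels":    ["light"],
--     "switch":    ["switch"],
--     "switches":  ["switch"],
--     "outlet":    ["switch"],
--     "plug":      ["switch"],
--     "fan":       ["fan", "switch"],
--     "scene":     ["scene"],
--     "lock":      ["lock"],
--     "unlock":    ["lock"],
--     "garage":    ["cover"],
--     "door":      ["lock", "cover", "binary_sensor"],
--     "blinds":    ["cover"],
--     "shades":    ["cover"],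
--     "shutter":   ["cover"],
--     "thermostat": ["climate"],
--     "temperature": ["climate", "sensor"],
--     "ac":        ["climate"],
--     "heat":      ["climate"],
--     "music":     ["media_player"],
--     "tv":        ["media_player"],
--     "speaker":   ["media_player"],
--     "camera":    ["camera"],
--     "alarm":     ["alarm_control_panel"],
-- }
--
-- def domain_filter_for_utterance(utterance: str) -> list[str] | None:
--     """Return a list of HA domains that the utterance plausibly refers
--     to, or None for "no narrowing" (let fuzzy match across everything).
--
--     Conservative: if any keyword matches, narrow; otherwise broad.
--     """
--     if not utterance:
--         return None
--     words = {w.strip(".,!?;:'\"").lower() for w in utterance.split()}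
--     domains: set[str] = set()
--     for w in words:
--         for hint in _DEFAULT_KEYWORD_DOMAINS.get(w, []):
--             domains.add(hint)
--     return sorted(domains) if domains else None
-- ===== SOURCE B (Python) =====
-- # Inverted index: domain -> keywords, listed in sorted domain order, so the
-- # output is built already sorted with no domain set and no final sort.
-- _DOMAIN_KEYWORDS: list[tuple[str, list[str]]] = [
--     ("alarm_control_panel", ["alarm"]),
--     ("binary_sensor", ["door"]),
--     ("camera", ["camera"]),
--     ("climate", ["thermostat", "temperature", "ac", "heat"]),
--     ("cover", ["garage", "door", "blinds", "shades", "shutter"]),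
--     ("fan", ["fan"]),
--     ("light", ["light", "lights", "lamp", "lamps", "bulb", "bulbs", "strip",
--                "strips", "zone", "zones", "segment", "segments", "node",
--                "nodes", "pixel", "pixels"]),
--     ("lock", ["lock", "unlock", "door"]),
--     ("media_player", ["music", "tv", "speaker"]),
--     ("scene", ["scene"]),
--     ("sensor", ["temperature"]),
--     ("switch", ["light", "lights", "switch", "switches", "outlet", "plug", "fan"]),
-- ]
--
--
-- def domain_filter_for_utterance(utterance: str) -> list[str] | None:
--     """Same result as A via an inverted index: for each HA domain (in sorted
--     order) emit it iff one of its trigger keywords occurs among the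
--     normalized words of the utterance."""
--     if not utterance:
--         return None
--     words = [w.strip(".,!?;:'\"").lower() for w in utterance.split()]
--     out = [d for d, kws in _DOMAIN_KEYWORDS if any(k in words for k in kws)]
--     return out or None
-- ===== Notes on version B (the rewrite author's own statement) =====
-- stated objective: alternative
-- what changed: B replaces the per-word dict lookups + domain set + final sort by a precomputed inverted index (domain -> trigger keywords, listed in sorted domain order): it emits each domain whose keyword list intersects the utterance's normalized words, so the output is built already sorted and deduplicated with no set and no sort.
import Mathlib
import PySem

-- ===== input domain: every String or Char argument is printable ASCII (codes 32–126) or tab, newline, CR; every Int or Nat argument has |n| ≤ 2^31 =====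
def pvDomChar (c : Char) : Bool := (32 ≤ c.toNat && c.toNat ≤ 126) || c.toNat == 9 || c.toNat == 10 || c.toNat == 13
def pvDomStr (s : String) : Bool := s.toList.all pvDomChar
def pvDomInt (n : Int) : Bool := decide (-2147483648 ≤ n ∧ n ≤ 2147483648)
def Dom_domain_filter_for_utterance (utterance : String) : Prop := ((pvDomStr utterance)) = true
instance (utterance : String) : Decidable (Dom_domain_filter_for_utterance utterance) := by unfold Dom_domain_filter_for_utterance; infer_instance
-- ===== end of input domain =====

-- B replaces the keyword->domains dict scan + set + sort by a precomputed inverted index (domain -> keywords, in sorted domain order), emitting the output already sorted with no set and no sort; same result, similar cost.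
set_option maxRecDepth 20000


-- ===== PORT A =====
-- the module constant _DEFAULT_KEYWORD_DOMAINS (a dict literal, insertion order)
def kwTable : PySem.Dict String (List String) := PySem.Dict.ofList [
  ("light",      ["light", "switch"]),
  ("lights",     ["light", "switch"]),
  ("lamp",       ["light"]),
  ("lamps",      ["light"]),
  ("bulb",       ["light"]),
  ("bulbs",      ["light"]),
  ("strip",      ["light"]),
  ("strips",     ["light"]),
  ("zone",       ["light"]),
  ("zones",      ["light"]),
  ("segment",    ["light"]),
  ("segments",   ["light"]),
  ("node",       ["light"]),
  ("nodes",      ["light"]),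
  ("pixel",      ["light"]),
  ("pixels",     ["light"]),
  ("switch",     ["switch"]),
  ("switches",   ["switch"]),
  ("outlet",     ["switch"]),
  ("plug",       ["switch"]),
  ("fan",        ["fan", "switch"]),
  ("scene",      ["scene"]),
  ("lock",       ["lock"]),
  ("unlock",     ["lock"]),
  ("garage",     ["cover"]),
  ("door",       ["lock", "cover", "binary_sensor"]),
  ("blinds",     ["cover"]),
  ("shades",     ["cover"]),
  ("shutter",    ["cover"]),
  ("thermostat", ["climate"]),
  ("temperature",["climate", "sensor"]),
  ("ac",         ["climate"]),
  ("heat",       ["climate"]),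
  ("music",      ["media_player"]),
  ("tv",         ["media_player"]),
  ("speaker",    ["media_player"]),
  ("camera",     ["camera"]),
  ("alarm",      ["alarm_control_panel"])]

-- {w.strip(".,!?;:'\"").lower() for w in utterance.split()}  (a Python set)
def normWords (utterance : String) : PySem.Set String :=
  PySem.Set.ofList ((PySem.Str.split₀ utterance).map
    (fun w => PySem.Str.lower (PySem.Str.stripChars w ".,!?;:'\"")))

-- A iterates over the Python set `words`; the result only builds a set then sorts it
-- without a key, so it is independent of the (unmodelled) set iteration order.
def domain_filter_for_utterance (utterance : String) : Option (List String) :=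
  if utterance = "" then none
  else
    let words := normWords utterance
    let domains : PySem.Set String :=
      words.foldl (fun d w =>
        (PySem.Dict.getD kwTable w []).foldl (fun d h => PySem.Set.add d h) d) PySem.Set.empty
    if domains = [] then none
    else some (PySem.List.sorted domains (fun x => x) false)

-- ===== PORT B =====
-- the module constant _DOMAIN_KEYWORDS: inverted index, in sorted domain order
def invTable : List (String × List String) := [
  ("alarm_control_panel", ["alarm"]),
  ("binary_sensor", ["door"]),
  ("camera", ["camera"]),
  ("climate", ["thermostat", "temperature", "ac", "heat"]),
  ("cover", ["garage", "door", "blinds", "shades", "shutter"]),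
  ("fan", ["fan"]),
  ("light", ["light", "lights", "lamp", "lamps", "bulb", "bulbs", "strip",
             "strips", "zone", "zones", "segment", "segments", "node",
             "nodes", "pixel", "pixels"]),
  ("lock", ["lock", "unlock", "door"]),
  ("media_player", ["music", "tv", "speaker"]),
  ("scene", ["scene"]),
  ("sensor", ["temperature"]),
  ("switch", ["light", "lights", "switch", "switches", "outlet", "plug", "fan"])]

def domain_filter_for_utterance_alt (utterance : String) : Option (List String) :=
  if utterance = "" then none
  else
    -- [w.strip(".,!?;:'\"").lower() for w in utterance.split()]  (a list; only membership is used)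
    let words := (PySem.Str.split₀ utterance).map
      (fun w => PySem.Str.lower (PySem.Str.stripChars w ".,!?;:'\""))
    -- [d for d, kws in _DOMAIN_KEYWORDS if any(k in words for k in kws)]
    let out := (invTable.filter (fun e => e.2.any (fun k => words.contains k))).map Prod.fst
    if out = [] then none else some out

-- ===== PRECONDITION & SPEC =====
def Spec_domain_filter_for_utterance (utterance : String) (out : Option (List String)) : Prop := out = domain_filter_for_utterance_alt utterance
instance (utterance : String) (out : Option (List String)) : Decidable (Spec_domain_filter_for_utterance utterance out) := by unfold Spec_domain_filter_for_utterance; infer_instance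

-- ===== CLAIM (what is proved, stated in full; the proofs are below) =====
def Claim_equal_domain_filter_for_utterance : Prop := ∀ (utterance : String), Dom_domain_filter_for_utterance utterance → Spec_domain_filter_for_utterance utterance (domain_filter_for_utterance utterance)

-- ===== LEMMAS AND PROOFS =====

theorem kwTable_keys_nodup : (PySem.Dict.keys kwTable).Nodup := by decide

-- the (keyword, domain) pairs named by each table
def pairsA : List (String × String) :=
  (PySem.Dict.items kwTable).flatMap (fun p => p.2.map (fun d => (p.1, d)))
def pairsB : List (String × String) :=
  invTable.flatMap (fun e => e.2.map (fun k => (k, e.1)))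

theorem pairsA_sub_pairsB : ∀ q ∈ pairsA, q ∈ pairsB := by decide
theorem pairsB_sub_pairsA : ∀ q ∈ pairsB, q ∈ pairsA := by decide

theorem invTable_fst_pairwise : (invTable.map Prod.fst).Pairwise (· < ·) := by
  have h : (invTable.map Prod.fst).Pairwise (fun a b => a.toList < b.toList) := by decide
  exact h.imp (fun hab => String.lt_iff_toList_lt.mpr hab)

theorem memA (ws : List String) (acc : PySem.Set String) (h : String) :
    h ∈ ws.foldl (fun d w =>
        (PySem.Dict.getD kwTable w []).foldl (fun d h => PySem.Set.add d h) d) acc ↔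
      h ∈ acc ∨ ∃ w ∈ ws, h ∈ PySem.Dict.getD kwTable w [] := by
  induction ws generalizing acc with
  | nil => simp
  | cons w ws ih =>
    simp only [List.foldl_cons, ih]
    have : (PySem.Dict.getD kwTable w []).foldl (fun d h => PySem.Set.add d h) acc
        = PySem.Set.update acc (PySem.Dict.getD kwTable w []) := rfl
    rw [this, PySem.Set.mem_update]
    constructor
    · rintro ((hm | hm) | ⟨w', hw', hm⟩)
      · exact .inl hm
      · exact .inr ⟨w, by simp, hm⟩
      · exact .inr ⟨w', by simp [hw'], hm⟩
    · rintro (hm | ⟨w', hw', hm⟩)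
      · exact .inl (.inl hm)
      · rcases List.mem_cons.mp hw' with rfl | hw'
        · exact .inl (.inr hm)
        · exact .inr ⟨w', hw', hm⟩

theorem nodupA (ws : List String) (acc : PySem.Set String) (hacc : acc.Nodup) :
    (ws.foldl (fun d w =>
        (PySem.Dict.getD kwTable w []).foldl (fun d h => PySem.Set.add d h) d) acc).Nodup := by
  induction ws generalizing acc with
  | nil => exact hacc
  | cons w ws ih =>
    exact ih _ (PySem.Set.nodup_update acc (PySem.Dict.getD kwTable w []) hacc)

theorem getD_mem_iff (w h : String) :
    h ∈ PySem.Dict.getD kwTable w [] ↔ (w, h) ∈ pairsA := by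
  constructor
  · intro hm
    cases hg : PySem.Dict.get? kwTable w with
    | none =>
      rw [PySem.Dict.getD_of_get?_eq_none kwTable [] hg] at hm
      exact absurd hm (List.not_mem_nil)
    | some hs =>
      rw [PySem.Dict.getD_of_get?_eq_some kwTable [] hg] at hm
      exact List.mem_flatMap.mpr ⟨(w, hs), PySem.Dict.mem_items_of_get?_eq_some kwTable hg,
        List.mem_map.mpr ⟨h, hm, rfl⟩⟩
  · intro hq
    rcases List.mem_flatMap.mp hq with ⟨p, hp, hm⟩
    rcases List.mem_map.mp hm with ⟨d, hd, he⟩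
    obtain ⟨rfl, rfl⟩ : p.1 = w ∧ d = h := by
      constructor <;> [exact congrArg Prod.fst he; exact congrArg Prod.snd he]
    rw [PySem.Dict.getD_of_mem_items kwTable (by exact hp) kwTable_keys_nodup []]
    exact hd

theorem memB (wl : List String) (h : String) :
    h ∈ (invTable.filter (fun e => e.2.any (fun k => wl.contains k))).map Prod.fst ↔
      ∃ w ∈ wl, (w, h) ∈ pairsB := by
  simp only [List.mem_map, List.mem_filter, List.any_eq_true, List.contains_eq_mem,
    decide_eq_true_eq, pairsB, List.mem_flatMap]
  constructor
  · rintro ⟨e, ⟨he, k, hk, hkw⟩, rfl⟩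
    exact ⟨k, hkw, e, he, ⟨k, hk, rfl⟩⟩
  · rintro ⟨w, hw, e, he, hm⟩
    rcases hm with ⟨k, hk, hkeq⟩
    obtain ⟨rfl, rfl⟩ : k = w ∧ e.1 = h := by
      constructor <;> [exact congrArg Prod.fst hkeq; exact congrArg Prod.snd hkeq]
    exact ⟨e, ⟨he, k, hk, hw⟩, rfl⟩

-- ===== VERDICT (by name: the statement is the Claim_ definition above) =====
theorem domain_filter_for_utterance_spec : Claim_equal_domain_filter_for_utterance := by
  intro utterance _
  unfold Spec_domain_filter_for_utterance
  unfold domain_filter_for_utterance domain_filter_for_utterance_alt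
  by_cases he : utterance = ""
  · simp [he]
  · simp only [if_neg he]
    set wl := (PySem.Str.split₀ utterance).map
      (fun w => PySem.Str.lower (PySem.Str.stripChars w ".,!?;:'\"")) with hwl
    have hnw : normWords utterance = PySem.Set.ofList wl := rfl
    set dA : PySem.Set String :=
      (normWords utterance).foldl (fun d w =>
        (PySem.Dict.getD kwTable w []).foldl (fun d h => PySem.Set.add d h) d) PySem.Set.empty with hdA
    set out := (invTable.filter (fun e => e.2.any (fun k => wl.contains k))).map Prod.fst with hout
    have hmem : ∀ h, h ∈ dA ↔ h ∈ out := by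
      intro h
      rw [hdA, memA, memB]
      simp only [PySem.Set.empty, List.not_mem_nil, false_or, hnw]
      constructor
      · rintro ⟨w, hw, hm⟩
        exact ⟨w, (PySem.Set.mem_ofList _ _).mp hw,
          pairsA_sub_pairsB _ ((getD_mem_iff w h).mp hm)⟩
      · rintro ⟨w, hw, hq⟩
        exact ⟨w, (PySem.Set.mem_ofList _ _).mpr hw,
          (getD_mem_iff w h).mpr (pairsB_sub_pairsA _ hq)⟩
    have houtpw : out.Pairwise (· < ·) := by
      exact invTable_fst_pairwise.sublist (List.filter_sublist.map Prod.fst)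
    have hperm : dA.Perm out := by
      rw [List.perm_ext_iff_of_nodup (nodupA _ _ (by simp [PySem.Set.empty]))
        (houtpw.imp (fun h => ne_of_lt h))]
      exact hmem
    have hemp : (dA = []) ↔ (out = []) := by
      constructor <;> intro hn
      · exact List.eq_nil_iff_forall_not_mem.mpr
          (fun x hx => by rw [hn] at hmem; exact (List.not_mem_nil) ((hmem x).mpr hx))
      · exact List.eq_nil_iff_forall_not_mem.mpr
          (fun x hx => by rw [hn] at hmem; exact (List.not_mem_nil) ((hmem x).mp hx))
    by_cases hA : dA = []
    · rw [if_pos hA, if_pos (hemp.mp hA)]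
    · rw [if_neg hA, if_neg (fun hB => hA (hemp.mpr hB))]
      exact congrArg some
        (PySem.List.sorted_eq_of_perm_of_pairwise_lt dA out (fun x => x) hperm.symm houtpw)
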